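-- pv_equiv track=rewrite | github.com/ale-durso/python_quarta | es_16_conta_righe_e_parole.py | numeroParole
-- ===== SOURCE A (Python) =====
-- def numeroParole(righe):
--     cont_p = 0
--     cont_c = 0
--     for riga in righe:
--         parole = riga.split()
--         for parola in parole:
--             cont_p += 1
--             for car in parola:
--                 if car != " " and car != "\n":
--                     cont_c += 1
--     return cont_p, cont_c
-- ===== SOURCE B (Python) =====
-- def numeroParole(righe):
--     # Character-level state machine: no splitting, no word lists.
--     # A word begins at each non-whitespace char preceded by whitespace/line start;
--     # every non-whitespace char is counted. Equivalent to split()-based counting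
--     # because split() partitions exactly the non-whitespace characters into
--     # maximal blocks.
--     p = 0
--     c = 0
--     for riga in righe:
--         in_word = False
--         for ch in riga:
--             if ch.isspace():
--                 in_word = False
--             else:
--                 c += 1
--                 if not in_word:
--                     p += 1
--                     in_word = True
--     return p, c
-- ===== Notes on version B (the rewrite author's own statement) =====
-- stated objective: alternative
-- what changed: Replaces split()-then-count (building word lists and iterating over each word's characters) by a single character-level state machine per line that counts word starts (non-space char preceded by space/line start) and non-space characters directly, allocating nothing.
import Mathlib
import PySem

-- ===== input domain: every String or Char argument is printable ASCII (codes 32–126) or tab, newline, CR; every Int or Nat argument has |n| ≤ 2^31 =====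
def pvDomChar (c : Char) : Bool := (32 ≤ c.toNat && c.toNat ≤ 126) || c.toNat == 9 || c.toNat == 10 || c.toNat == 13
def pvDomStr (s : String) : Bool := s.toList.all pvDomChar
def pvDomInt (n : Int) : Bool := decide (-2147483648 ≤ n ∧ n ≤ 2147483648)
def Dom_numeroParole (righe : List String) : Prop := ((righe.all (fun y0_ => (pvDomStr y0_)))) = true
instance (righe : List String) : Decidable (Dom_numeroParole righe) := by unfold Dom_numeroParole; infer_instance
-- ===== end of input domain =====

-- B replaces split()-then-count by a per-line character state machine counting word starts and non-space chars directly (alternative decomposition, same cost).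


-- ===== PORT A =====
-- triple-nested accumulation over split() output, exactly as in the Python
def numeroParole (righe : List String) : Int × Int :=
  righe.foldl
    (fun st riga =>
      let parole := PySem.Str.split₀ riga
      parole.foldl
        (fun st parola =>
          let cont_p := st.1 + 1
          let cont_c := parola.toList.foldl
            (fun cc car => if car ≠ ' ' ∧ car ≠ '\n' then cc + 1 else cc) st.2
          (cont_p, cont_c))
        st)
    (0, 0)

-- ===== PORT B =====
-- per-line character state machine: (in_word, p, c)
def numeroParole_alt (righe : List String) : Int × Int :=
  righe.foldl
    (fun st riga =>
      let r := riga.toList.foldl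
        (fun (s : Bool × Int × Int) ch =>
          if PySem.Chars.isspace ch then (false, s.2.1, s.2.2)
          else (true, if s.1 then s.2.1 else s.2.1 + 1, s.2.2 + 1))
        (false, st.1, st.2)
      (r.2.1, r.2.2))
    (0, 0)

-- ===== PRECONDITION & SPEC =====
def Spec_numeroParole (righe : List String) (out : Int × Int) : Prop := out = numeroParole_alt righe
instance (righe : List String) (out : Int × Int) : Decidable (Spec_numeroParole righe out) := by unfold Spec_numeroParole; infer_instance

-- ===== CLAIM =====
def Claim_equal_numeroParole : Prop := ∀ (righe : List String), Dom_numeroParole righe → Spec_numeroParole righe (numeroParole righe)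

-- ===== LEMMAS AND PROOFS =====

-- number of words the scan starting in state iw sees in s
def pvNw : List Char → Bool → Int
  | [], _ => 0
  | a :: t, iw =>
    if PySem.Chars.isspace a then pvNw t false
    else (if iw then 0 else 1) + pvNw t true

-- number of non-whitespace chars of s
def pvNs : List Char → Int
  | [] => 0
  | a :: t => (if PySem.Chars.isspace a then 0 else 1) + pvNs t

-- split₀.go result length via the scan count
theorem go_len (s : List Char) : ∀ (cur : List Char) (acc : List (List Char)),
    ((PySem.Chars.split₀.go s cur acc).length : Int)
      = acc.length + (if cur.isEmpty then 0 else 1) + pvNw s (!cur.isEmpty) := by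
  induction s with
  | nil =>
    intro cur acc
    simp only [PySem.Chars.split₀.go, pvNw]
    split <;> simp
  | cons a t ih =>
    intro cur acc
    simp only [PySem.Chars.split₀.go, pvNw]
    by_cases hs : PySem.Chars.isspace a = true
    · rw [if_pos hs, if_pos hs]
      by_cases hc : cur.isEmpty
      · rw [if_pos hc, if_pos hc, ih]; simp
      · rw [if_neg hc, if_neg hc, ih]; simp
    · rw [if_neg hs, if_neg hs, ih]
      by_cases hc : cur.isEmpty <;> simp [hc] <;> ring

-- split₀.go summed word lengths via the non-space count
theorem go_sum (s : List Char) : ∀ (cur : List Char) (acc : List (List Char)),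
    (((PySem.Chars.split₀.go s cur acc).map (fun l => (l.length : Int))).sum)
      = ((acc.map (fun l => (l.length : Int))).sum) + cur.length + pvNs s := by
  induction s with
  | nil =>
    intro cur acc
    simp only [PySem.Chars.split₀.go, pvNs]
    split
    · next h => simp [List.isEmpty_iff.mp h]
    · simp [add_comm]
  | cons a t ih =>
    intro cur acc
    simp only [PySem.Chars.split₀.go, pvNs]
    by_cases hs : PySem.Chars.isspace a = true
    · rw [if_pos hs, if_pos hs]
      by_cases hc : cur.isEmpty
      · rw [if_pos hc, ih]; simp [List.isEmpty_iff.mp hc]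
      · rw [if_neg hc, ih]; simp; ring
    · rw [if_neg hs, if_neg hs, ih]
      simp; ring

-- every char of every word produced by split₀.go is non-whitespace
theorem split0_go_nonspace (s cur : List Char) (acc : List (List Char))
    (hcur : ∀ c ∈ cur, PySem.Chars.isspace c = false)
    (hacc : ∀ l ∈ acc, ∀ c ∈ l, PySem.Chars.isspace c = false) :
    ∀ l ∈ PySem.Chars.split₀.go s cur acc, ∀ c ∈ l, PySem.Chars.isspace c = false := by
  induction s generalizing cur acc with
  | nil =>
    intro l hl c hc
    simp only [PySem.Chars.split₀.go] at hl
    split at hl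
    · exact hacc l (List.mem_reverse.mp hl) c hc
    · rcases List.mem_cons.mp (List.mem_reverse.mp hl) with h | h
      · exact hcur c (List.mem_reverse.mp (h ▸ hc))
      · exact hacc l h c hc
  | cons a rest ih =>
    intro l hl c hc
    simp only [PySem.Chars.split₀.go] at hl
    by_cases hs : PySem.Chars.isspace a = true
    · rw [if_pos hs] at hl
      split at hl
      · exact ih [] acc (by simp) hacc l hl c hc
      · refine ih [] (cur.reverse :: acc) (by simp) ?_ l hl c hc
        intro l' hl' c' hc'
        rcases List.mem_cons.mp hl' with h | h
        · exact hcur c' (List.mem_reverse.mp (h ▸ hc'))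
        · exact hacc l' h c' hc'
    · rw [if_neg hs] at hl
      refine ih (a :: cur) acc ?_ hacc l hl c hc
      intro c' hc'
      rcases List.mem_cons.mp hc' with h | h
      · simpa [h] using hs
      · exact hcur c' h

theorem split0_nonspace (s : String) :
    ∀ w ∈ PySem.Str.split₀ s, ∀ c ∈ w.toList, PySem.Chars.isspace c = false := by
  intro w hw c hc
  simp only [PySem.Str.split₀, List.mem_map] at hw
  obtain ⟨l, hl, rfl⟩ := hw
  refine split0_go_nonspace s.toList [] [] (by simp) (by simp) l hl c ?_
  simpa using hc

-- A's inner char loop counts every char when none is whitespace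
theorem char_fold_len (l : List Char) (cc : Int)
    (h : ∀ c ∈ l, PySem.Chars.isspace c = false) :
    l.foldl (fun cc car => if car ≠ ' ' ∧ car ≠ '\n' then cc + 1 else cc) cc
      = cc + l.length := by
  induction l generalizing cc with
  | nil => simp
  | cons a t ih =>
    have ha : a ≠ ' ' ∧ a ≠ '\n' := by
      have := h a (List.mem_cons_self ..)
      constructor <;> rintro rfl <;> simp [PySem.Chars.isspace] at this
    simp only [List.foldl_cons, if_pos ha, List.length_cons]
    rw [ih (cc + 1) (fun c hc => h c (List.mem_cons_of_mem _ hc))]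
    push_cast; ring

-- A's word loop over one line's words, from any state
theorem word_fold (ws : List String) (st : Int × Int)
    (h : ∀ w ∈ ws, ∀ c ∈ w.toList, PySem.Chars.isspace c = false) :
    ws.foldl
      (fun st parola =>
        let cont_p := st.1 + 1
        let cont_c := parola.toList.foldl
          (fun cc car => if car ≠ ' ' ∧ car ≠ '\n' then cc + 1 else cc) st.2
        (cont_p, cont_c)) st
      = (st.1 + ws.length, st.2 + (ws.map (fun w => ((w.toList.length : Int)))).sum) := by
  induction ws generalizing st with
  | nil => simp
  | cons w t ih =>
    simp only [List.foldl_cons]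
    rw [char_fold_len _ _ (h w (List.mem_cons_self ..)),
        ih _ (fun w' hw' => h w' (List.mem_cons_of_mem _ hw'))]
    refine Prod.ext ?_ ?_
    · simp; ring
    · simp; ring

-- A's per-line word count and char count in terms of pvNw / pvNs
theorem split0_len (s : String) :
    ((PySem.Str.split₀ s).length : Int) = pvNw s.toList false := by
  simp only [PySem.Str.split₀, PySem.Chars.split₀, List.length_map]
  simpa using go_len s.toList [] []

theorem split0_sum (s : String) :
    ((PySem.Str.split₀ s).map (fun w => ((w.toList.length : Int)))).sum = pvNs s.toList := by
  simp only [PySem.Str.split₀, List.map_map]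
  have : ((PySem.Chars.split₀ s.toList).map (fun l => (l.length : Int))).sum = pvNs s.toList := by
    simpa [PySem.Chars.split₀] using go_sum s.toList [] []
  rw [← this]
  congr 1
  apply List.map_congr_left
  intro l _
  simp

-- B's inner char fold computes (·, p + pvNw s iw, c + pvNs s)
theorem scan_fold (s : List Char) : ∀ (iw : Bool) (p c : Int),
    (s.foldl
      (fun (st : Bool × Int × Int) ch =>
        if PySem.Chars.isspace ch then (false, st.2.1, st.2.2)
        else (true, if st.1 then st.2.1 else st.2.1 + 1, st.2.2 + 1))
      (iw, p, c)).2
      = (p + pvNw s iw, c + pvNs s) := by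
  induction s with
  | nil => intro iw p c; simp [pvNw, pvNs]
  | cons a t ih =>
    intro iw p c
    simp only [List.foldl_cons, pvNw, pvNs]
    by_cases hs : PySem.Chars.isspace a = true
    · rw [if_pos hs, if_pos hs, if_pos hs, ih]
      simp
    · rw [if_neg hs, if_neg hs, if_neg hs, ih]
      by_cases hi : iw = true <;> simp [hi] <;> ring_nf <;> simp [add_comm, add_assoc, add_left_comm]

-- ===== VERDICT =====
theorem numeroParole_spec : Claim_equal_numeroParole := by
  intro righe hdom
  clear hdom
  unfold Spec_numeroParole numeroParole numeroParole_alt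
  suffices h : ∀ (p c : Int),
      righe.foldl
        (fun st riga =>
          (PySem.Str.split₀ riga).foldl
            (fun st parola =>
              let cont_p := st.1 + 1
              let cont_c := parola.toList.foldl
                (fun cc car => if car ≠ ' ' ∧ car ≠ '\n' then cc + 1 else cc) st.2
              (cont_p, cont_c)) st) (p, c)
      = righe.foldl
          (fun st riga =>
            let r := riga.toList.foldl
              (fun (s : Bool × Int × Int) ch =>
                if PySem.Chars.isspace ch then (false, s.2.1, s.2.2)
                else (true, if s.1 then s.2.1 else s.2.1 + 1, s.2.2 + 1))
              (false, st.1, st.2)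
            (r.2.1, r.2.2)) (p, c) by
    simpa using h 0 0
  induction righe with
  | nil => intro p c; simp
  | cons r t ih =>
    intro p c
    simp only [List.foldl_cons]
    rw [word_fold _ _ (split0_nonspace r)]
    have hb : ((r.toList.foldl
        (fun (s : Bool × Int × Int) ch =>
          if PySem.Chars.isspace ch then (false, s.2.1, s.2.2)
          else (true, if s.1 then s.2.1 else s.2.1 + 1, s.2.2 + 1))
        (false, p, c)).2) = (p + pvNw r.toList false, c + pvNs r.toList) := scan_fold r.toList false p c
    simp only []
    rw [split0_len, split0_sum] at *
    rw [show ((r.toList.foldl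
        (fun (s : Bool × Int × Int) ch =>
          if PySem.Chars.isspace ch then (false, s.2.1, s.2.2)
          else (true, if s.1 then s.2.1 else s.2.1 + 1, s.2.2 + 1))
        (false, p, c)).2.1,
        (r.toList.foldl
        (fun (s : Bool × Int × Int) ch =>
          if PySem.Chars.isspace ch then (false, s.2.1, s.2.2)
          else (true, if s.1 then s.2.1 else s.2.1 + 1, s.2.2 + 1))
        (false, p, c)).2.2) = (p + pvNw r.toList false, c + pvNs r.toList) from by
          rw [← hb]]
    exact ih _ _
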